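-- pv_equiv track=rewrite | github.com/Knottyashcreative/digest_documents_script | obsidian_pro_master.py | _strip_inline_flags
-- ===== SOURCE A (Python) =====
-- def _strip_inline_flags(pattern: str) -> str:
--     """Remove leading (?i) etc. so alternation compiles; use re.IGNORECASE instead."""
--     p = pattern.strip()
--     while True:
--         if p.startswith("(?i)"):
--             p = p[4:].lstrip()
--             continue
--         if p.startswith("(?-i)"):
--             p = p[5:].lstrip()
--             continue
--         break
--     return p
-- ===== SOURCE B (Python) =====
-- import re
--
-- # One anchored regex consumes every leading (?i)/(?-i) group plus following whitespace.
-- _FLAG_PREFIX = re.compile(r'(?:\(\?-?i\)\s*)+')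
--
-- def _strip_inline_flags(pattern: str) -> str:
--     """Remove leading (?i) etc. so alternation compiles; use re.IGNORECASE instead."""
--     p = pattern.strip()
--     m = _FLAG_PREFIX.match(p)
--     return p[m.end():] if m else p
-- ===== Notes on version B (the rewrite author's own statement) =====
-- stated objective: idiomatic
-- what changed: A's while-loop of startswith/slice/lstrip steps is replaced by a single precompiled anchored regex that matches the whole leading-flags prefix at once; B slices the string once at the match end.
import Mathlib
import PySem

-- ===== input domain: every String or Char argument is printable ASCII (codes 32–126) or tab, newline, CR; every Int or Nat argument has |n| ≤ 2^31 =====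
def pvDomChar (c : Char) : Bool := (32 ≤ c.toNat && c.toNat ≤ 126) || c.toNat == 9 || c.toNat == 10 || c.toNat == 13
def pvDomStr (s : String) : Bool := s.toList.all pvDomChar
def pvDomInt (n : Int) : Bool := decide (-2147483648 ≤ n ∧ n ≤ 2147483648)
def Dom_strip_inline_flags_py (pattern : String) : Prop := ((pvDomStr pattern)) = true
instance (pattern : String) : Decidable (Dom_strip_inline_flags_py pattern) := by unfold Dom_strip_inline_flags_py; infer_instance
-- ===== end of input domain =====

-- B replaces A's while-loop of startswith/slice/lstrip steps by a single anchored
-- regex match that computes the length of the whole leading-flags prefix and drops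
-- it in one slice (objective: idiomatic).


-- ===== PORT A =====
-- the 'while True' loop of A, on the code points of p
def pvLoopA (p : List Char) : List Char :=
  if PySem.Chars.startswith p "(?i)".toList then
    pvLoopA (PySem.Chars.lstrip (PySem.Chars.slice p (some 4) none))
  else if PySem.Chars.startswith p "(?-i)".toList then
    pvLoopA (PySem.Chars.lstrip (PySem.Chars.slice p (some 5) none))
  else p
termination_by p.length
decreasing_by
  · rename_i h
    have hpre := (PySem.Chars.startswith_iff (s := p) (p := "(?i)".toList)).mp h
    have h4 : 4 ≤ p.length := by simpa using hpre.length_le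
    have h1 : (PySem.Chars.lstrip (PySem.Chars.slice p (some 4) none)).length
        ≤ (PySem.Chars.slice p (some 4) none).length := by
      simp [PySem.Chars.lstrip]
      exact List.length_dropWhile_le _ _
    have h2 : (PySem.Chars.slice p (some 4) none).length < p.length := by
      simp [PySem.Chars.slice_eq_listSlice, PySem.List.slice_from]
      omega
    omega
  · rename_i h
    have hpre := (PySem.Chars.startswith_iff (s := p) (p := "(?-i)".toList)).mp h
    have h5 : 5 ≤ p.length := by simpa using hpre.length_le
    have h1 : (PySem.Chars.lstrip (PySem.Chars.slice p (some 5) none)).length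
        ≤ (PySem.Chars.slice p (some 5) none).length := by
      simp [PySem.Chars.lstrip]
      exact List.length_dropWhile_le _ _
    have h2 : (PySem.Chars.slice p (some 5) none).length < p.length := by
      simp [PySem.Chars.slice_eq_listSlice, PySem.List.slice_from]
      omega
    omega

def strip_inline_flags_py (pattern : String) : String :=
  String.mk (pvLoopA (PySem.Chars.strip pattern.toList))

-- ===== PORT B =====
-- one unit of B's regex: \(\?-?i\) followed by \s* ; returns the matched length
-- (exact on Dom: there \s matches exactly the characters Chars.isspace accepts)
def pvFlagUnit (p : List Char) : Option Nat :=
  if "(?i)".toList.isPrefixOf p then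
    some (4 + ((p.drop 4).takeWhile PySem.Chars.isspace).length)
  else if "(?-i)".toList.isPrefixOf p then
    some (5 + ((p.drop 5).takeWhile PySem.Chars.isspace).length)
  else none

-- the '+' repetition: total length matched by the anchored regex (0 = no match)
def pvMatchLen (p : List Char) : Nat :=
  match h : pvFlagUnit p with
  | none => 0
  | some k => k + pvMatchLen (p.drop k)
termination_by p.length
decreasing_by
  have h' := h
  unfold pvFlagUnit at h'
  split_ifs at h' with h1 h2
  · injection h' with he
    have hl := (List.isPrefixOf_iff_prefix.mp h1).length_le
    simp at hl
    simp [List.length_drop]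
    omega
  · injection h' with he
    have hl := (List.isPrefixOf_iff_prefix.mp h2).length_le
    simp at hl
    simp [List.length_drop]
    omega

def strip_inline_flags_py_alt (pattern : String) : String :=
  let p := PySem.Str.strip pattern
  String.mk (p.toList.drop (pvMatchLen p.toList))

-- ===== PRECONDITION & SPEC =====
def Spec_strip_inline_flags_py (pattern : String) (out : String) : Prop := out = strip_inline_flags_py_alt pattern
instance (pattern : String) (out : String) : Decidable (Spec_strip_inline_flags_py pattern out) := by unfold Spec_strip_inline_flags_py; infer_instance

-- ===== CLAIM (what is proved, stated in full; the proofs are below) =====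
def Claim_equal_strip_inline_flags_py : Prop := ∀ (pattern : String), Dom_strip_inline_flags_py pattern → Spec_strip_inline_flags_py pattern (strip_inline_flags_py pattern)

-- ===== LEMMAS AND PROOFS =====

theorem dropWhile_eq_drop_takeWhile {α : Type} (q : α → Bool) (l : List α) :
    l.dropWhile q = l.drop (l.takeWhile q).length := by
  induction l with
  | nil => rfl
  | cons a t ih =>
    by_cases h : q a = true <;> simp [List.dropWhile, List.takeWhile, h, ih]

theorem pvLoopA_eq_drop (p : List Char) : pvLoopA p = p.drop (pvMatchLen p) := by
  induction p using pvLoopA.induct with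
  | case1 p h ih =>
    have hpre : "(?i)".toList <+: p := (PySem.Chars.startswith_iff _ _).mp h
    have harg : PySem.Chars.lstrip (PySem.Chars.slice p (some 4) none)
        = (p.drop 4).drop ((p.drop 4).takeWhile PySem.Chars.isspace).length := by
      simp [PySem.Chars.lstrip, PySem.Chars.slice_eq_listSlice, PySem.List.slice_from,
        dropWhile_eq_drop_takeWhile]
    have hunit : pvFlagUnit p = some (4 + ((p.drop 4).takeWhile PySem.Chars.isspace).length) := by
      unfold pvFlagUnit
      rw [if_pos (List.isPrefixOf_iff_prefix.mpr hpre)]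
    have hml : pvMatchLen p
        = (4 + ((p.drop 4).takeWhile PySem.Chars.isspace).length)
          + pvMatchLen (p.drop (4 + ((p.drop 4).takeWhile PySem.Chars.isspace).length)) := by
      rw [pvMatchLen]
      split
      · rename_i heq; simp [hunit] at heq
      · rename_i k heq
        rw [heq] at hunit
        injection hunit with he
        rw [← he]
    rw [harg] at ih
    conv_lhs => rw [pvLoopA]
    rw [if_pos h, harg, ih, hml]
    simp [List.drop_drop]
  | case2 p h1 h2 ih =>
    have hpre : "(?-i)".toList <+: p := (PySem.Chars.startswith_iff _ _).mp h2
    have harg : PySem.Chars.lstrip (PySem.Chars.slice p (some 5) none)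
        = (p.drop 5).drop ((p.drop 5).takeWhile PySem.Chars.isspace).length := by
      simp [PySem.Chars.lstrip, PySem.Chars.slice_eq_listSlice, PySem.List.slice_from,
        dropWhile_eq_drop_takeWhile]
    have hn1 : ¬ ("(?i)".toList.isPrefixOf p = true) :=
      fun hc => h1 ((PySem.Chars.startswith_iff _ _).mpr (List.isPrefixOf_iff_prefix.mp hc))
    have hunit : pvFlagUnit p = some (5 + ((p.drop 5).takeWhile PySem.Chars.isspace).length) := by
      unfold pvFlagUnit
      rw [if_neg hn1, if_pos (List.isPrefixOf_iff_prefix.mpr hpre)]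
    have hml : pvMatchLen p
        = (5 + ((p.drop 5).takeWhile PySem.Chars.isspace).length)
          + pvMatchLen (p.drop (5 + ((p.drop 5).takeWhile PySem.Chars.isspace).length)) := by
      rw [pvMatchLen]
      split
      · rename_i heq; simp [hunit] at heq
      · rename_i k heq
        rw [heq] at hunit
        injection hunit with he
        rw [← he]
    rw [harg] at ih
    conv_lhs => rw [pvLoopA]
    rw [if_neg h1, if_pos h2, harg, ih, hml]
    simp [List.drop_drop]
  | case3 p h1 h2 =>
    have hn1 : ¬ ("(?i)".toList.isPrefixOf p = true) :=
      fun hc => h1 ((PySem.Chars.startswith_iff _ _).mpr (List.isPrefixOf_iff_prefix.mp hc))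
    have hn2 : ¬ ("(?-i)".toList.isPrefixOf p = true) :=
      fun hc => h2 ((PySem.Chars.startswith_iff _ _).mpr (List.isPrefixOf_iff_prefix.mp hc))
    have hunit : pvFlagUnit p = none := by
      unfold pvFlagUnit
      rw [if_neg hn1, if_neg hn2]
    have hml : pvMatchLen p = 0 := by
      rw [pvMatchLen]
      split
      · rfl
      · rename_i k heq; simp [hunit] at heq
    conv_lhs => rw [pvLoopA]
    rw [if_neg h1, if_neg h2, hml]
    simp

-- ===== VERDICT (by name: the statement is the Claim_ definition above) =====
theorem strip_inline_flags_py_spec : Claim_equal_strip_inline_flags_py := by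
  intro pattern _
  unfold Spec_strip_inline_flags_py strip_inline_flags_py strip_inline_flags_py_alt
  simp only [PySem.Str.toList_strip]
  rw [pvLoopA_eq_drop]
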